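-- pv_equiv track=rewrite | github.com/exsonic/OnlineChallenge | SearchAndSort.py | guessHitAndPseudoHit
-- ===== SOURCE A (Python) =====
-- def guessHitAndPseudoHit(solution, guess):
-- 	s_dict = {}
-- 	for i, color in enumerate(solution):
-- 		if color not in s_dict:
-- 			s_dict[color] = {i : True}
-- 		else:
-- 			s_dict[color][i] = True
--
-- 	hit, pseudo_hit = 0, 0
-- 	for i, color in enumerate(guess):
-- 		if color in s_dict:
-- 			if i in s_dict[color]:
-- 				hit += 1
-- 			else:
-- 				pseudo_hit += 1
-- 	return hit, pseudo_hit
-- ===== SOURCE B (Python) =====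
-- def guessHitAndPseudoHit(solution, guess):
--     hit = sum(1 for s, g in zip(solution, guess) if s == g)
--     colors = set(solution)
--     matched = sum(1 for g in guess if g in colors)
--     return hit, matched - hit
-- ===== Notes on version B (the rewrite author's own statement) =====
-- stated objective: simpler
-- what changed: Replaces the dict-of-position-dicts and the branching classification loop by two independent counting passes (exact hits over zip, color matches over a set of solution colors) combined arithmetically as (hit, matched - hit).
import Mathlib
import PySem

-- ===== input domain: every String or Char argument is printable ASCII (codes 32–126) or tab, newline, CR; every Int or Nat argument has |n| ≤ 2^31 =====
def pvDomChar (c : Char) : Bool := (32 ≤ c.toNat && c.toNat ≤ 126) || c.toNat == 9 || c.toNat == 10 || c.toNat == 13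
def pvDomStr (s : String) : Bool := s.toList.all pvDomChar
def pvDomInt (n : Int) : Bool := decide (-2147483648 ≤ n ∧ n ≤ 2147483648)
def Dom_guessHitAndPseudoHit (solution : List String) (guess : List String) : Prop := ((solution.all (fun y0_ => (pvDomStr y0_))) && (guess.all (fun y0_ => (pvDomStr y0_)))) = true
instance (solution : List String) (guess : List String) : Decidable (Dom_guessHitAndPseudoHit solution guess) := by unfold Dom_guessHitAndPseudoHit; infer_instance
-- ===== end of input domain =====

-- B replaces A's dict-of-position-dicts and its branching classification loop by two
-- independent counting passes combined arithmetically (hit, matched - hit): simpler decomposition, same cost.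

-- ===== PORT A =====
-- one iteration of A's first loop: s_dict[color] gains position i
def pvStepA (d : PySem.Dict String (PySem.Dict Int Bool)) (p : Int × String) :
    PySem.Dict String (PySem.Dict Int Bool) :=
  if d.contains p.2 = false then d.insert p.2 (PySem.Dict.empty.insert p.1 true)
  else d.insert p.2 ((d.getD p.2 PySem.Dict.empty).insert p.1 true)

-- A's first loop: build s_dict from enumerate(solution)
def pvBuildA (solution : List String) : PySem.Dict String (PySem.Dict Int Bool) :=
  (PySem.List.enumerate solution).foldl pvStepA PySem.Dict.empty

def guessHitAndPseudoHit (solution : List String) (guess : List String) : Int × Int :=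
  let s_dict := pvBuildA solution
  (PySem.List.enumerate guess).foldl (fun acc p =>
      if s_dict.contains p.2 then
        if (s_dict.getD p.2 PySem.Dict.empty).contains p.1 then (acc.1 + 1, acc.2)
        else (acc.1, acc.2 + 1)
      else acc) ((0 : Int), (0 : Int))

-- ===== PORT B =====
def guessHitAndPseudoHit_alt (solution : List String) (guess : List String) : Int × Int :=
  let hit : Int := ((solution.zip guess).countP (fun p => p.1 == p.2) : Nat)
  let colors : PySem.Set String := PySem.Set.ofList solution
  let matched : Int := (guess.countP (fun g => colors.contains g) : Nat)
  (hit, matched - hit)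

-- ===== PRECONDITION & SPEC =====
def Spec_guessHitAndPseudoHit (solution : List String) (guess : List String) (out : Int × Int) : Prop := out = guessHitAndPseudoHit_alt solution guess
instance (solution : List String) (guess : List String) (out : Int × Int) : Decidable (Spec_guessHitAndPseudoHit solution guess out) := by unfold Spec_guessHitAndPseudoHit; infer_instance

-- ===== CLAIM (what is proved, stated in full; the proofs are below) =====
def Claim_equal_guessHitAndPseudoHit : Prop := ∀ (solution : List String) (guess : List String), Dom_guessHitAndPseudoHit solution guess → Spec_guessHitAndPseudoHit solution guess (guessHitAndPseudoHit solution guess)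

-- ===== LEMMAS AND PROOFS =====

lemma pvStepA_contains (d : PySem.Dict String (PySem.Dict Int Bool)) (p : Int × String)
    (c : String) : (pvStepA d p).contains c = (d.contains c || p.2 == c) := by
  unfold pvStepA
  split_ifs with hb <;>
    simp [PySem.Dict.contains_insert, Bool.or_comm, BEq.comm]

lemma pvStepA_inner (d : PySem.Dict String (PySem.Dict Int Bool)) (p : Int × String)
    (c : String) (i : Int) :
    ((pvStepA d p).getD c PySem.Dict.empty).contains i
      = (((d.getD c PySem.Dict.empty).contains i) || (p.2 == c && p.1 == i)) := by
  unfold pvStepA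
  split_ifs with hb <;> rw [PySem.Dict.getD_insert] <;> by_cases hc : c = p.2
  · subst hc
    rw [PySem.Dict.getD_of_not_contains _ _ hb]
    simp [PySem.Dict.contains_insert, BEq.comm]
  · simp [hc, Ne.symm hc]
  · subst hc
    simp [PySem.Dict.contains_insert, BEq.comm, Bool.or_comm]
  · simp [hc, Ne.symm hc]

lemma pvFold_contains (ps : List (Int × String)) (d : PySem.Dict String (PySem.Dict Int Bool))
    (c : String) :
    (ps.foldl pvStepA d).contains c = (d.contains c || ps.any (fun p => p.2 == c)) := by
  induction ps generalizing d with
  | nil => simp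
  | cons p ps ih => simp [ih, pvStepA_contains, Bool.or_assoc]

lemma pvFold_inner (ps : List (Int × String)) (d : PySem.Dict String (PySem.Dict Int Bool))
    (c : String) (i : Int) :
    ((ps.foldl pvStepA d).getD c PySem.Dict.empty).contains i
      = (((d.getD c PySem.Dict.empty).contains i) || ps.any (fun p => p.2 == c && p.1 == i)) := by
  induction ps generalizing d with
  | nil => simp
  | cons p ps ih => simp [ih, pvStepA_inner, Bool.or_assoc]

lemma pvBuildA_contains (solution : List String) (c : String) :
    (pvBuildA solution).contains c = solution.contains c := by
  rw [pvBuildA, pvFold_contains]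
  have h1 : (PySem.List.enumerate solution).any (fun p => p.2 == c)
      = ((PySem.List.enumerate solution).map (·.2)).any (fun x => x == c) := by
    rw [List.any_map]; rfl
  simp only [PySem.Dict.contains_empty, Bool.false_or, h1, PySem.List.map_snd_enumerate]
  rw [Bool.eq_iff_iff, List.any_eq_true, List.contains_eq_mem]
  simp

lemma pvBuildA_inner (solution : List String) (c : String) (k : Nat) :
    ((pvBuildA solution).getD c PySem.Dict.empty).contains (k : Int)
      = (solution[k]? == some c) := by
  rw [pvBuildA, pvFold_inner]
  simp only [PySem.Dict.getD_empty, PySem.Dict.contains_empty, Bool.false_or]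
  rw [Bool.eq_iff_iff, List.any_eq_true, beq_iff_eq]
  constructor
  · rintro ⟨p, hp, hpred⟩
    rw [PySem.List.mem_enumerate_iff] at hp
    obtain ⟨m, hm, rfl⟩ := hp
    simp only [Bool.and_eq_true, beq_iff_eq] at hpred
    obtain ⟨h2, h1⟩ := hpred
    have hmk : m = k := by omega
    subst hmk
    simp [List.getElem?_eq_getElem hm, h2]
  · intro h
    have hk : k < solution.length := by
      rcases List.getElem?_eq_some_iff.mp h with ⟨hlt, -⟩
      exact hlt
    refine ⟨((0 : Int) + (k : Nat), solution[k]), ?_, ?_⟩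
    · rw [PySem.List.mem_enumerate_iff]
      exact ⟨k, hk, rfl⟩
    · have h2 : solution[k] = c := by
        have := List.getElem?_eq_getElem hk
        rw [this] at h
        exact Option.some.inj h
      simp [h2]

lemma pvLoop_counts (C H : Int × String → Bool) (l : List (Int × String)) (h p : Int) :
    l.foldl (fun acc q =>
        if C q then (if H q then (acc.1 + 1, acc.2) else (acc.1, acc.2 + 1)) else acc) (h, p)
      = (h + (l.countP (fun q => C q && H q) : Nat),
         p + (l.countP (fun q => C q && !H q) : Nat)) := by
  induction l generalizing h p with
  | nil => simp
  | cons q l ih =>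
    by_cases hc : C q <;> by_cases hh : H q <;>
      simp [hc, hh, ih] <;> ring

lemma pvZip_count (s : List String) (g : List String) (n : Nat) :
    (g.zipIdx n).countP (fun q => s[q.2]? == some q.1)
      = ((s.drop n).zip g).countP (fun q => q.1 == q.2) := by
  induction g generalizing n with
  | nil => simp
  | cons b g ih =>
    rw [List.zipIdx_cons, List.countP_cons]
    cases hd : s.drop n with
    | nil =>
      have hn : s[n]? = none := by
        rw [← Nat.add_zero n, ← List.getElem?_drop, hd]
        simp
      have hd1 : s.drop (n + 1) = [] := by
        rw [← List.tail_drop, hd]; rfl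
      simp [ih, hd1, hn]
    | cons a rest =>
      have hn : s[n]? = some a := by
        rw [← Nat.add_zero n, ← List.getElem?_drop, hd]
        simp
      have hd1 : s.drop (n + 1) = rest := by
        rw [← List.tail_drop, hd]; rfl
      rw [List.zip_cons_cons, List.countP_cons]
      simp [ih, hd1, hn]

lemma pvHit_count (s : List String) (g : List String) :
    (PySem.List.enumerate g).countP (fun q =>
        ((pvBuildA s).getD q.2 PySem.Dict.empty).contains q.1)
      = (s.zip g).countP (fun q => q.1 == q.2) := by
  rw [PySem.List.enumerate_eq_zipIdx_map, List.countP_map]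
  simp only [Function.comp_def]
  have h1 : ∀ q ∈ g.zipIdx, (((pvBuildA s).getD q.1 PySem.Dict.empty).contains
      ((0 : Int) + (q.2 : Nat)) = true) ↔ ((s[q.2]? == some q.1) = true) := by
    intro q hq
    have h0 : ((0 : Int) + (q.2 : Nat)) = ((q.2 : Nat) : Int) := by omega
    rw [h0, pvBuildA_inner]
  rw [List.countP_congr h1, pvZip_count]
  simp

lemma pvMatched_count (s : List String) (g : List String) :
    (PySem.List.enumerate g).countP (fun q => (pvBuildA s).contains q.2)
      = g.countP (fun c => (PySem.Set.ofList s).contains c) := by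
  rw [PySem.List.enumerate_eq_zipIdx_map, List.countP_map]
  simp only [Function.comp_def]
  have h2 : g.countP (fun c => (PySem.Set.ofList s).contains c)
      = (g.zipIdx.map Prod.fst).countP (fun c => (PySem.Set.ofList s).contains c) := by
    simp
  rw [h2, List.countP_map]
  simp only [Function.comp_def]
  apply List.countP_congr
  intro q hq
  rw [pvBuildA_contains]
  have h3 : (PySem.Set.ofList s).contains q.1 = s.contains q.1 := by
    simp [PySem.Set.contains]
  rw [h3]

lemma pvH_imp_C (s : List String) (c : String) (i : Int)
    (h : ((pvBuildA s).getD c PySem.Dict.empty).contains i = true) :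
    (pvBuildA s).contains c = true := by
  rw [pvBuildA, pvFold_inner] at h
  rw [pvBuildA, pvFold_contains]
  simp only [PySem.Dict.getD_empty, PySem.Dict.contains_empty, Bool.false_or,
    List.any_eq_true] at h ⊢
  obtain ⟨p, hp, hpred⟩ := h
  exact ⟨p, hp, ((Bool.and_eq_true _ _).mp hpred).1⟩

lemma pvCountP_split (l : List (Int × String)) (C Q : Int × String → Bool) :
    l.countP (fun x => C x && Q x) + l.countP (fun x => C x && !Q x) = l.countP C := by
  induction l with
  | nil => simp
  | cons x l ih =>
    by_cases hc : C x <;> by_cases hq : Q x <;>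
      simp [hc, hq] <;> omega


-- ===== VERDICT (by name: the statement is the Claim_ definition above) =====
theorem guessHitAndPseudoHit_spec : Claim_equal_guessHitAndPseudoHit := by
  intro solution guess _
  unfold Spec_guessHitAndPseudoHit guessHitAndPseudoHit guessHitAndPseudoHit_alt
  rw [pvLoop_counts (fun q => (pvBuildA solution).contains q.2)
      (fun q => ((pvBuildA solution).getD q.2 PySem.Dict.empty).contains q.1)]
  have hCH : (PySem.List.enumerate guess).countP (fun q =>
        (pvBuildA solution).contains q.2
          && ((pvBuildA solution).getD q.2 PySem.Dict.empty).contains q.1)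
      = (PySem.List.enumerate guess).countP (fun q =>
        ((pvBuildA solution).getD q.2 PySem.Dict.empty).contains q.1) := by
    apply List.countP_congr
    intro q hq
    constructor
    · intro h; exact ((Bool.and_eq_true _ _).mp h).2
    · intro h; exact (Bool.and_eq_true _ _).mpr ⟨pvH_imp_C _ _ _ h, h⟩
  have hsplit := pvCountP_split (PySem.List.enumerate guess)
      (fun q => (pvBuildA solution).contains q.2)
      (fun q => ((pvBuildA solution).getD q.2 PySem.Dict.empty).contains q.1)
  rw [hCH] at hsplit
  have hhit := pvHit_count solution guess
  have hmat := pvMatched_count solution guess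
  refine Prod.ext ?_ ?_
  · show (0 : Int) + _ = ((solution.zip guess).countP (fun p => p.1 == p.2) : Nat)
    rw [hCH, hhit]
    omega
  · show (0 : Int) + _ = ((guess.countP (fun g => (PySem.Set.ofList solution).contains g) : Nat))
        - ((solution.zip guess).countP (fun p => p.1 == p.2) : Nat)
    rw [← hmat, ← hhit]
    omega
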